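-- pv_equiv track=rewrite | github.com/M1nseoPark/CodingtestStudy | 스타수열.py | solution
-- ===== SOURCE A (Python) =====
-- from collections import Counter
--
-- def solution(a):
--     answer = -1
--     dic = Counter(a)
--
--     for k, v in dic.items():
--         if v <= answer:
--             continue
--
--         cnt, idx = 0, 0
--         while idx < len(a) - 1:
--             if (a[idx] != k and a[idx+1] != k) or (a[idx] == a[idx+1]):
--                 idx += 1
--                 continue
--
--             cnt += 1
--             idx += 2
--
--         answer = max(cnt, answer)
--
--     if answer == -1:
--         return -1
--
--     return answer * 2
-- ===== SOURCE B (Python) =====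
-- def solution(a):
--     if not a:
--         return -1
--     best = 0
--     cnt = {}
--     nxt = {}
--     for i in range(len(a) - 1):
--         x, y = a[i], a[i + 1]
--         if x == y:
--             continue
--         for k in (x, y):
--             if nxt.get(k, 0) <= i:
--                 c = cnt.get(k, 0) + 1
--                 cnt[k] = c
--                 nxt[k] = i + 2
--                 if c > best:
--                     best = c
--     return 2 * best
-- ===== Notes on version B (the rewrite author's own statement) =====
-- stated objective: alternative
-- what changed: Instead of re-scanning the whole array once per distinct value (greedy pair scan per Counter key), B makes a single left-to-right pass that maintains, per value, the greedy pair count and the next free index in dictionaries, updating a running maximum.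
import Mathlib
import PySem

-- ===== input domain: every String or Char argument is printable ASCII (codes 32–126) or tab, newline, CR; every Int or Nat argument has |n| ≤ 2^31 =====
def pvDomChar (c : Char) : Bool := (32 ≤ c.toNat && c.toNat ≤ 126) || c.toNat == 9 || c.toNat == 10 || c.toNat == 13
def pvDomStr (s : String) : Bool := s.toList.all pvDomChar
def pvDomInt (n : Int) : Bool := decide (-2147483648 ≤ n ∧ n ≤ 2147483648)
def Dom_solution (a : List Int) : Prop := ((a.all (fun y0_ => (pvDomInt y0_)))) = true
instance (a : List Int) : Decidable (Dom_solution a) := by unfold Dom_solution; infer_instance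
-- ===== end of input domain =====

-- B replaces A's per-distinct-value rescans of the array by one left-to-right pass that keeps
-- each value's greedy pair count and next free index in dictionaries (objective: alternative).

-- ===== PORT A =====
-- A's inner while loop; idx stays ≥ 0 and is only read when idx+1 < len, so
-- List.getD is exact for Python's a[idx] / a[idx+1] here.
def solGo (a : List Int) (k : Int) (cnt : Int) (idx : Nat) : Int :=
  if idx + 1 < a.length then
    if (a.getD idx 0 ≠ k ∧ a.getD (idx+1) 0 ≠ k) ∨ a.getD idx 0 = a.getD (idx+1) 0 then
      solGo a k cnt (idx+1)
    else
      solGo a k (cnt+1) (idx+2)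
  else cnt
termination_by a.length - idx

def solution (a : List Int) : Int :=
  let dic := PySem.Dict.counter a
  let answer := dic.items.foldl (fun answer kv =>
      if kv.2 ≤ answer then answer
      else max (solGo a kv.1 0 0) answer) (-1)
  if answer = -1 then -1 else answer * 2

-- ===== PORT B =====
-- body of Source B's inner `for k in (x, y)` loop; state = (cnt, nxt, best)
def altK (i : Nat) (st : PySem.Dict Int Int × PySem.Dict Int Int × Int) (k : Int) :
    PySem.Dict Int Int × PySem.Dict Int Int × Int :=
  if st.2.1.getD k 0 ≤ (i : Int) then
    let c := st.1.getD k 0 + 1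
    (st.1.insert k c, (st.2.1.insert k ((i : Int) + 2), if st.2.2 < c then c else st.2.2))
  else st

-- Source B's `for i in range(len(a)-1)` loop, run for the first m indices
def altLoop (a : List Int) (m : Nat) : PySem.Dict Int Int × PySem.Dict Int Int × Int :=
  (List.range m).foldl (fun st i =>
    let x := a.getD i 0
    let y := a.getD (i+1) 0
    if x = y then st else altK i (altK i st x) y)
    (PySem.Dict.empty, PySem.Dict.empty, 0)

def solution_alt (a : List Int) : Int :=
  if a.length = 0 then -1 else 2 * (altLoop a (a.length - 1)).2.2

-- ===== PRECONDITION & SPEC =====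
def Spec_solution (a : List Int) (out : Int) : Prop := out = solution_alt a
instance (a : List Int) (out : Int) : Decidable (Spec_solution a out) := by unfold Spec_solution; infer_instance

-- ===== CLAIM (what is proved, stated in full; the proofs are below) =====
def Claim_equal_solution : Prop := ∀ (a : List Int), Dom_solution a → Spec_solution a (solution a)

-- ===== LEMMAS AND PROOFS =====

-- reference per-value greedy state after scanning the first m adjacent pairs:
-- (pair count, next free index)
def elig (a : List Int) (k : Int) (m : Nat) : Bool :=
  (a.getD m 0 == k || a.getD (m+1) 0 == k) && !(a.getD m 0 == a.getD (m+1) 0)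

def ref (a : List Int) (k : Int) : Nat → Int × Nat
  | 0 => (0, 0)
  | m+1 =>
    let s := ref a k m
    if elig a k m ∧ s.2 ≤ m then (s.1 + 1, m + 2) else s

theorem ref_snd_le (a : List Int) (k : Int) (m : Nat) : (ref a k m).2 ≤ m + 1 := by
  induction m with
  | zero => simp [ref]
  | succ m ih => simp only [ref]; split <;> omega

theorem ref_fst_nonneg (a : List Int) (k : Int) (m : Nat) : 0 ≤ (ref a k m).1 := by
  induction m with
  | zero => simp [ref]
  | succ m ih => simp only [ref]; split <;> omega

theorem solGo_stop (a : List Int) (k : Int) (cnt : Int) (idx : Nat)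
    (h : a.length ≤ idx + 1) : solGo a k cnt idx = cnt := by
  rw [solGo]; simp [Nat.not_lt.mpr h]

theorem solGo_shift_fuel (a : List Int) (k : Int) :
    ∀ (n : Nat) (cnt : Int) (idx : Nat), a.length - idx ≤ n →
      solGo a k cnt idx = cnt + solGo a k 0 idx := by
  intro n
  induction n with
  | zero =>
    intro cnt idx h
    rw [solGo_stop a k cnt idx (by omega), solGo_stop a k 0 idx (by omega)]
    simp
  | succ n ih =>
    intro cnt idx h
    by_cases hgz : a.length ≤ idx + 1
    · rw [solGo_stop a k cnt idx hgz, solGo_stop a k 0 idx hgz]; simp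
    rw [solGo]; conv_rhs => rw [solGo]
    by_cases hg : idx + 1 < a.length
    · simp only [hg, if_true]
      split
      · exact ih cnt (idx+1) (by omega)
      · rw [ih (cnt+1) (idx+2) (by omega), ih (0+1) (idx+2) (by omega)]
        ring
    · simp [hg]

theorem solGo_shift (a : List Int) (k : Int) (cnt : Int) (idx : Nat) :
    solGo a k cnt idx = cnt + solGo a k 0 idx :=
  solGo_shift_fuel a k (a.length) cnt idx (by omega)

theorem solGo_ref (a : List Int) (k : Int) (m : Nat) (hm : m ≤ a.length - 1) :
    solGo a k 0 0 = (ref a k m).1 + solGo a k 0 (max m (ref a k m).2) := by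
  induction m with
  | zero => simp [ref]
  | succ m ih =>
    have hlen : m + 1 < a.length := by omega
    have hsle := ref_snd_le a k m
    have ihm := ih (by omega)
    by_cases hc : (elig a k m = true ∧ (ref a k m).2 ≤ m)
    · have hstep : ref a k (m+1) = ((ref a k m).1 + 1, m + 2) := by
        simp only [ref]; rw [if_pos hc]
      rw [hstep]
      have hmax : max m (ref a k m).2 = m := by omega
      rw [hmax] at ihm
      have helig : (a.getD m 0 = k ∨ a.getD (m+1) 0 = k) ∧ ¬ a.getD m 0 = a.getD (m+1) 0 := by
        have h := hc.1
        simp only [elig, Bool.and_eq_true, Bool.or_eq_true, beq_iff_eq,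
          Bool.not_eq_eq_eq_not, Bool.not_true, beq_eq_false_iff_ne, ne_eq] at h
        exact h
      have hnskip : ¬ ((a.getD m 0 ≠ k ∧ a.getD (m+1) 0 ≠ k) ∨ a.getD m 0 = a.getD (m+1) 0) := by
        rintro (⟨h1, h2⟩ | h)
        · rcases helig.1 with h' | h' <;> [exact h1 h'; exact h2 h']
        · exact helig.2 h
      have hgo : solGo a k 0 m = 1 + solGo a k 0 (m + 2) := by
        rw [solGo]
        simp only [hlen, if_true, if_neg hnskip]
        rw [solGo_shift]
        ring
      rw [ihm, hgo]
      have : max (m+1) (m+2) = m + 2 := by omega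
      rw [this]; ring
    · have hstep : ref a k (m+1) = ref a k m := by
        simp only [ref]; rw [if_neg hc]
      rw [hstep]
      by_cases hs : (ref a k m).2 ≤ m
      · have helig : ¬ (elig a k m = true) := fun h => hc ⟨h, hs⟩
        have hskip : ((a.getD m 0 ≠ k ∧ a.getD (m+1) 0 ≠ k) ∨ a.getD m 0 = a.getD (m+1) 0) := by
          rw [show (elig a k m = true) = ((a.getD m 0 = k ∨ a.getD (m+1) 0 = k) ∧ ¬ a.getD m 0 = a.getD (m+1) 0) from by
            simp only [elig, Bool.and_eq_true, Bool.or_eq_true, beq_iff_eq,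
              Bool.not_eq_eq_eq_not, Bool.not_true, beq_eq_false_iff_ne, ne_eq]] at helig
          by_cases h1 : a.getD m 0 = a.getD (m+1) 0
          · exact Or.inr h1
          · left
            constructor
            · intro hk; exact helig ⟨Or.inl hk, h1⟩
            · intro hk; exact helig ⟨Or.inr hk, h1⟩
        have hmax1 : max m (ref a k m).2 = m := by omega
        have hmax2 : max (m+1) (ref a k m).2 = m + 1 := by omega
        rw [hmax1] at ihm
        rw [hmax2, ihm]
        congr 1
        conv_lhs => rw [solGo]
        simp only [hlen, if_true, if_pos hskip]
      · have h2 : (ref a k m).2 = m + 1 := by omega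
        have hmax1 : max m (ref a k m).2 = m + 1 := by omega
        have hmax2 : max (m+1) (ref a k m).2 = m + 1 := by omega
        rw [hmax1] at ihm
        rw [hmax2, ihm]

theorem solGo_le_count_fuel (a : List Int) (k : Int) :
    ∀ (n : Nat) (cnt : Int) (idx : Nat), a.length - idx ≤ n →
      solGo a k cnt idx ≤ cnt + ((a.drop idx).count k : Int) := by
  intro n
  induction n with
  | zero =>
    intro cnt idx h
    rw [solGo_stop a k cnt idx (by omega)]
    omega
  | succ n ih =>
    intro cnt idx h
    rw [solGo]
    by_cases hg : idx + 1 < a.length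
    · have hidx : idx < a.length := by omega
      have hdrop : a.drop idx = a[idx] :: a.drop (idx + 1) := List.drop_eq_getElem_cons hidx
      simp only [hg, if_true]
      split
      · refine le_trans (ih cnt (idx+1) (by omega)) ?_
        rw [hdrop, List.count_cons]
        push_cast
        omega
      · rename_i hcond
        have hdrop2 : a.drop (idx+1) = a[idx+1] :: a.drop (idx + 2) :=
          List.drop_eq_getElem_cons hg
        have hk : a[idx] = k ∨ a[idx+1] = k := by
          rw [List.getD_eq_getElem a 0 hidx, List.getD_eq_getElem a 0 hg] at hcond
          by_cases h1 : a[idx] = k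
          · exact Or.inl h1
          · by_cases h2 : a[idx+1] = k
            · exact Or.inr h2
            · exact absurd (Or.inl ⟨h1, h2⟩) hcond
        refine le_trans (ih (cnt+1) (idx+2) (by omega)) ?_
        rw [hdrop, hdrop2, List.count_cons, List.count_cons]
        rcases hk with hk | hk <;> simp [hk] <;> omega
    · rw [if_neg hg]
      omega

theorem solGo_le_count (a : List Int) (k : Int) (cnt : Int) (idx : Nat) :
    solGo a k cnt idx ≤ cnt + ((a.drop idx).count k : Int) :=
  solGo_le_count_fuel a k (a.length) cnt idx (by omega)

-- max over the distinct values of the per-value greedy count after m steps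
def bmax (a : List Int) (m : Nat) : Int :=
  ((PySem.Set.ofList a).map (fun k => (ref a k m).1)).foldl max 0

theorem foldl_max_init_comm (L : List Int) (b c : Int) :
    L.foldl max (max b c) = max (L.foldl max b) c := by
  induction L generalizing b with
  | nil => rfl
  | cons x t ih =>
    simp only [List.foldl_cons]
    rw [show max (max b c) x = max (max b x) c by rw [max_right_comm], ih]

theorem foldl_max_update (f g : Int → Int) (k c : Int) (hle : f k ≤ c)
    (hg : ∀ j, g j = if j = k then c else f j) :
    ∀ (K : List Int) (b : Int), k ∈ K →
      (K.map g).foldl max b = max ((K.map f).foldl max b) c := by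
  intro K
  induction K with
  | nil => intro b hk; cases hk
  | cons j t ih =>
    intro b hk
    simp only [List.map_cons, List.foldl_cons]
    by_cases hj : j = k
    · subst hj
      rw [hg j, if_pos rfl]
      by_cases hk' : j ∈ t
      · rw [ih (max b c) hk', foldl_max_init_comm, foldl_max_init_comm,
          max_assoc, max_self, max_assoc, max_eq_right hle]
      · have hgf : t.map g = t.map f := by
          apply List.map_congr_left
          intro x hx
          rw [hg x, if_neg (show ¬ x = j from fun h => hk' (h ▸ hx))]
        rw [hgf, foldl_max_init_comm, foldl_max_init_comm, max_assoc, max_eq_right hle]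
      -- note: after `subst hj`, `j` stands for the updated key
    · have hk2 : k ∈ t := by
        rcases List.mem_cons.mp hk with h | h
        · exact absurd h.symm hj
        · exact h
      rw [hg j, if_neg hj, ih (max b (f j)) hk2]

theorem foldl_max_zeros (L : List Int) : (L.map (fun _ => (0:Int))).foldl max 0 = 0 := by
  induction L with
  | nil => rfl
  | cons x t ih => simpa using ih

theorem elig_iff (a : List Int) (k : Int) (m : Nat) :
    elig a k m = true ↔
      ((a.getD m 0 = k ∨ a.getD (m+1) 0 = k) ∧ ¬ a.getD m 0 = a.getD (m+1) 0) := by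
  simp only [elig, Bool.and_eq_true, Bool.or_eq_true, beq_iff_eq,
    Bool.not_eq_eq_eq_not, Bool.not_true, beq_eq_false_iff_ne, ne_eq]

theorem ref_succ (a : List Int) (k : Int) (m : Nat) :
    ref a k (m+1) =
      if elig a k m = true ∧ (ref a k m).2 ≤ m then ((ref a k m).1 + 1, m + 2)
      else ref a k m := by
  simp only [ref]

theorem altK_cnt (i : Nat) (st : PySem.Dict Int Int × PySem.Dict Int Int × Int) (k j : Int) :
    (altK i st k).1.getD j 0 =
      if j = k ∧ st.2.1.getD k 0 ≤ (i : Int) then st.1.getD k 0 + 1 else st.1.getD j 0 := by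
  unfold altK
  by_cases hg : st.2.1.getD k 0 ≤ (i : Int)
  · simp only [if_pos hg, PySem.Dict.getD_insert]
    by_cases hj : j = k <;> simp [hj, hg]
  · simp only [if_neg hg]
    simp [hg]

theorem altK_nxt (i : Nat) (st : PySem.Dict Int Int × PySem.Dict Int Int × Int) (k j : Int) :
    (altK i st k).2.1.getD j 0 =
      if j = k ∧ st.2.1.getD k 0 ≤ (i : Int) then (i : Int) + 2 else st.2.1.getD j 0 := by
  unfold altK
  by_cases hg : st.2.1.getD k 0 ≤ (i : Int)
  · simp only [if_pos hg, PySem.Dict.getD_insert]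
    by_cases hj : j = k <;> simp [hj, hg]
  · simp only [if_neg hg]
    simp [hg]

theorem altK_best (i : Nat) (st : PySem.Dict Int Int × PySem.Dict Int Int × Int) (k : Int) :
    (altK i st k).2.2 =
      if st.2.1.getD k 0 ≤ (i : Int) then max st.2.2 (st.1.getD k 0 + 1) else st.2.2 := by
  unfold altK
  by_cases hg : st.2.1.getD k 0 ≤ (i : Int)
  · simp only [if_pos hg]
    rw [max_def]
    split_ifs <;> omega
  · simp [hg]

theorem altLoop_succ (a : List Int) (m : Nat) :
    altLoop a (m+1) =
      (if a.getD m 0 = a.getD (m+1) 0 then altLoop a m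
       else altK m (altK m (altLoop a m) (a.getD m 0)) (a.getD (m+1) 0)) := by
  unfold altLoop
  rw [List.range_succ, List.foldl_append]
  rfl

theorem init_le_foldl_max (L : List Int) (b : Int) : b ≤ L.foldl max b := by
  induction L generalizing b with
  | nil => simp
  | cons y t ih => exact le_trans (le_max_left b y) (ih (max b y))

theorem altLoop_proj (a : List Int) : ∀ (m : Nat), m ≤ a.length - 1 →
    (∀ k, (altLoop a m).1.getD k 0 = (ref a k m).1 ∧
          (altLoop a m).2.1.getD k 0 = (((ref a k m).2 : Nat) : Int)) ∧
    (altLoop a m).2.2 = bmax a m := by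
  intro m
  induction m with
  | zero =>
    intro _
    refine ⟨fun k => ⟨?_, ?_⟩, ?_⟩
    · simp [altLoop, ref]
    · simp [altLoop, ref]
    · show (0 : Int) = bmax a 0
      unfold bmax
      rw [show ((PySem.Set.ofList a).map fun k => (ref a k 0).1)
            = (PySem.Set.ofList a).map (fun _ => (0:Int)) from
          List.map_congr_left (fun j _ => by simp [ref])]
      rw [foldl_max_zeros]
  | succ m ih =>
    intro hm
    obtain ⟨ihd, ihb⟩ := ih (by omega)
    have ihc : ∀ k, (altLoop a m).1.getD k 0 = (ref a k m).1 := fun k => (ihd k).1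
    have ihn : ∀ k, (altLoop a m).2.1.getD k 0 = (((ref a k m).2 : Nat) : Int) :=
      fun k => (ihd k).2
    have hm0 : m < a.length := by omega
    have hm1 : m + 1 < a.length := by omega
    rw [altLoop_succ]
    by_cases hxy : a.getD m 0 = a.getD (m+1) 0
    · rw [if_pos hxy]
      have href : ∀ k, ref a k (m+1) = ref a k m := by
        intro k
        rw [ref_succ, if_neg]
        rintro ⟨he, -⟩
        rw [elig_iff] at he
        exact he.2 hxy
      refine ⟨fun k => by rw [href k]; exact ihd k, ?_⟩
      rw [ihb]
      unfold bmax
      congr 1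
      exact List.map_congr_left (fun k _ => by rw [href k])
    · rw [if_neg hxy]
      have hyx : ¬ a.getD (m+1) 0 = a.getD m 0 := fun h => hxy h.symm
      have href : ∀ k, ref a k (m+1) =
          if (a.getD m 0 = k ∨ a.getD (m+1) 0 = k) ∧ (ref a k m).2 ≤ m
          then ((ref a k m).1 + 1, m + 2) else ref a k m := by
        intro k
        rw [ref_succ]
        simp only [elig_iff, hxy, not_false_iff, and_true]
      have hyxg : ¬(a.getD (m+1) 0 = a.getD m 0 ∧ (ref a (a.getD m 0) m).2 ≤ m) :=
        fun h => hyx h.1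
      constructor
      · intro k
        constructor
        · -- cnt component
          simp only [altK_cnt, altK_nxt, ihc, ihn, Nat.cast_le]
          rw [href k]
          by_cases hky : k = a.getD (m+1) 0
          · subst hky
            rw [if_neg hyxg, if_neg hyxg]
            by_cases hgy : (ref a (a.getD (m+1) 0) m).2 ≤ m
            · rw [if_pos ⟨rfl, Nat.cast_le.mpr hgy⟩, if_pos ⟨Or.inr rfl, hgy⟩]
            · rw [if_neg (fun hc => hgy (Nat.cast_le.mp hc.2)), if_neg (fun hc => hgy hc.2)]
          · by_cases hkx : k = a.getD m 0
            · subst hkx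
              rw [if_neg (fun hc => hxy hc.1)]
              by_cases hgx : (ref a (a.getD m 0) m).2 ≤ m
              · rw [if_pos ⟨rfl, hgx⟩, if_pos ⟨Or.inl rfl, hgx⟩]
              · rw [if_neg (fun hc => hgx hc.2), if_neg (fun hc => hgx hc.2)]
            · rw [if_neg (fun hc => hky hc.1), if_neg (fun hc => hkx hc.1),
                if_neg (fun hc => hc.1.elim (fun h => hkx h.symm) (fun h => hky h.symm))]
        · -- nxt component
          simp only [altK_nxt, ihn, Nat.cast_le]
          rw [href k]
          by_cases hky : k = a.getD (m+1) 0
          · subst hky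
            rw [if_neg hyxg]
            by_cases hgy : (ref a (a.getD (m+1) 0) m).2 ≤ m
            · rw [if_pos ⟨rfl, Nat.cast_le.mpr hgy⟩, if_pos ⟨Or.inr rfl, hgy⟩]
              push_cast
              ring
            · rw [if_neg (fun hc => hgy (Nat.cast_le.mp hc.2)), if_neg (fun hc => hgy hc.2)]
          · by_cases hkx : k = a.getD m 0
            · subst hkx
              rw [if_neg (fun hc => hxy hc.1)]
              by_cases hgx : (ref a (a.getD m 0) m).2 ≤ m
              · rw [if_pos ⟨rfl, hgx⟩, if_pos ⟨Or.inl rfl, hgx⟩]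
                push_cast
                ring
              · rw [if_neg (fun hc => hgx hc.2), if_neg (fun hc => hgx hc.2)]
            · rw [if_neg (fun hc => hky hc.1), if_neg (fun hc => hkx hc.1),
                if_neg (fun hc => hc.1.elim (fun h => hkx h.symm) (fun h => hky h.symm))]
      · -- best component
        have hxK : a.getD m 0 ∈ PySem.Set.ofList a := by
          rw [PySem.Set.mem_ofList, List.getD_eq_getElem a 0 hm0]
          exact List.getElem_mem hm0
        have hyK : a.getD (m+1) 0 ∈ PySem.Set.ofList a := by
          rw [PySem.Set.mem_ofList, List.getD_eq_getElem a 0 hm1]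
          exact List.getElem_mem hm1
        simp only [altK_best, altK_nxt, altK_cnt, ihc, ihn, ihb, Nat.cast_le]
        rw [if_neg hyxg, if_neg hyxg]
        simp only [Nat.cast_le]
        by_cases hgx : (ref a (a.getD m 0) m).2 ≤ m <;>
          by_cases hgy : (ref a (a.getD (m+1) 0) m).2 ≤ m
        · -- both x and y matched at step m
          rw [if_pos hgy, if_pos hgx]
          have h1 := foldl_max_update (fun j => (ref a j m).1)
            (fun j => if j = a.getD m 0 then (ref a (a.getD m 0) m).1 + 1 else (ref a j m).1)
            (a.getD m 0) ((ref a (a.getD m 0) m).1 + 1) (le_of_lt (lt_add_one _)) (fun j => rfl)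
            (PySem.Set.ofList a) 0 hxK
          have h2 := foldl_max_update
            (fun j => if j = a.getD m 0 then (ref a (a.getD m 0) m).1 + 1 else (ref a j m).1)
            (fun j => (ref a j (m+1)).1)
            (a.getD (m+1) 0) ((ref a (a.getD (m+1) 0) m).1 + 1)
            (by beta_reduce; rw [if_neg hyx]; omega)
            (by
              intro j
              beta_reduce
              rw [href j]
              by_cases hjy : j = a.getD (m+1) 0
              · subst hjy
                rw [if_pos ⟨Or.inr rfl, hgy⟩, if_pos rfl]
              · by_cases hjx : j = a.getD m 0
                · subst hjx
                  rw [if_pos ⟨Or.inl rfl, hgx⟩, if_neg hjy, if_pos rfl]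
                · rw [if_neg, if_neg hjy, if_neg hjx]
                  rintro ⟨hd, -⟩
                  rcases hd with h | h
                  · exact hjx h.symm
                  · exact hjy h.symm)
            (PySem.Set.ofList a) 0 hyK
          rw [show bmax a (m+1)
              = max (max (bmax a m) ((ref a (a.getD m 0) m).1 + 1))
                    ((ref a (a.getD (m+1) 0) m).1 + 1) from by
            unfold bmax; rw [h2, h1]]
        · -- only x matched
          rw [if_neg hgy, if_pos hgx]
          have h1 := foldl_max_update (fun j => (ref a j m).1)
            (fun j => (ref a j (m+1)).1)
            (a.getD m 0) ((ref a (a.getD m 0) m).1 + 1) (le_of_lt (lt_add_one _))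
            (by
              intro j
              beta_reduce
              rw [href j]
              by_cases hjx : j = a.getD m 0
              · subst hjx
                rw [if_pos ⟨Or.inl rfl, hgx⟩, if_pos rfl]
              · by_cases hjy : j = a.getD (m+1) 0
                · subst hjy
                  rw [if_neg, if_neg hyx]
                  rintro ⟨-, hle⟩
                  exact hgy hle
                · rw [if_neg, if_neg hjx]
                  rintro ⟨hd, -⟩
                  rcases hd with h | h
                  · exact hjx h.symm
                  · exact hjy h.symm)
            (PySem.Set.ofList a) 0 hxK
          rw [show bmax a (m+1) = max (bmax a m) ((ref a (a.getD m 0) m).1 + 1) from by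
            unfold bmax; rw [h1]]
        · -- only y matched
          rw [if_pos hgy, if_neg hgx]
          have h1 := foldl_max_update (fun j => (ref a j m).1)
            (fun j => (ref a j (m+1)).1)
            (a.getD (m+1) 0) ((ref a (a.getD (m+1) 0) m).1 + 1) (le_of_lt (lt_add_one _))
            (by
              intro j
              beta_reduce
              rw [href j]
              by_cases hjy : j = a.getD (m+1) 0
              · subst hjy
                rw [if_pos ⟨Or.inr rfl, hgy⟩, if_pos rfl]
              · by_cases hjx : j = a.getD m 0
                · subst hjx
                  rw [if_neg, if_neg hjy]
                  rintro ⟨-, hle⟩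
                  exact hgx hle
                · rw [if_neg, if_neg hjy]
                  rintro ⟨hd, -⟩
                  rcases hd with h | h
                  · exact hjx h.symm
                  · exact hjy h.symm)
            (PySem.Set.ofList a) 0 hyK
          rw [show bmax a (m+1) = max (bmax a m) ((ref a (a.getD (m+1) 0) m).1 + 1) from by
            unfold bmax; rw [h1]]
        · -- neither matched
          rw [if_neg hgy, if_neg hgx]
          rw [show bmax a (m+1) = bmax a m from by
            unfold bmax
            congr 1
            apply List.map_congr_left
            intro j _
            rw [href j, if_neg]
            rintro ⟨hd, hle⟩
            rcases hd with h | h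
            · rw [← h] at hle; exact hgx hle
            · rw [← h] at hle; exact hgy hle]

theorem solGo_eq_ref (a : List Int) (k : Int) (hnil : a ≠ []) :
    solGo a k 0 0 = (ref a k (a.length - 1)).1 := by
  have hlen0 : a.length ≠ 0 := fun h0 => hnil (List.eq_nil_of_length_eq_zero h0)
  rw [solGo_ref a k (a.length - 1) (le_refl _),
    solGo_stop a k 0 _ (by have := ref_snd_le a k (a.length - 1); omega)]
  ring

theorem foldl_skip (a : List Int) (v : Int → Int)
    (hgv : ∀ k, solGo a k 0 0 ≤ v k) :
    ∀ (K : List Int) (init : Int),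
      K.foldl (fun ans k => if v k ≤ ans then ans else max (solGo a k 0 0) ans) init
        = K.foldl (fun ans k => max (solGo a k 0 0) ans) init := by
  intro K
  induction K with
  | nil => intro init; rfl
  | cons j t ih =>
    intro init
    simp only [List.foldl_cons]
    by_cases h : v j ≤ init
    · rw [if_pos h, ih init, max_eq_right (le_trans (hgv j) h)]
    · rw [if_neg h, ih (max (solGo a j 0 0) init)]

theorem foldl_max_swap (a : List Int) (N : Nat) :
    ∀ (L : List Int) (b : Int),
      L.foldl (fun ans k => max ((ref a k N).1) ans) b
        = (L.map (fun k => (ref a k N).1)).foldl max b := by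
  intro L
  induction L with
  | nil => intro b; rfl
  | cons j t ih =>
    intro b
    simp only [List.foldl_cons, List.map_cons]
    rw [max_comm]
    exact ih _

-- ===== VERDICT (by name: the statement is the Claim_ definition above) =====
theorem solution_spec : Claim_equal_solution := by
  unfold Claim_equal_solution Spec_solution
  intro a _
  by_cases hnil : a = []
  · subst hnil; rfl
  · have hlen0 : a.length ≠ 0 := fun h0 => hnil (List.eq_nil_of_length_eq_zero h0)
    simp only [solution, solution_alt]
    rw [if_neg hlen0]
    rw [(altLoop_proj a (a.length - 1) (le_refl _)).2]
    rw [PySem.Dict.items_counter]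
    rw [List.foldl_map]
    rw [foldl_skip a (fun k => ((a.count k : Nat) : Int))
      (fun k => by simpa using solGo_le_count a k 0 0) (PySem.Set.ofList a) (-1)]
    have hg : ∀ k, solGo a k 0 0 = (ref a k (a.length - 1)).1 :=
      fun k => solGo_eq_ref a k hnil
    simp only [hg]
    rw [foldl_max_swap a (a.length - 1) (PySem.Set.ofList a) (-1)]
    have hKne : PySem.Set.ofList a ≠ [] := by
      obtain ⟨z, zs, hzz⟩ := List.exists_cons_of_ne_nil hnil
      have hmem : z ∈ PySem.Set.ofList a := by
        rw [PySem.Set.mem_ofList, hzz]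
        exact List.mem_cons_self
      exact List.ne_nil_of_mem hmem
    obtain ⟨k0, K', hK⟩ := List.exists_cons_of_ne_nil hKne
    unfold bmax
    rw [hK]
    simp only [List.map_cons, List.foldl_cons]
    have h0 : 0 ≤ (ref a k0 (a.length - 1)).1 := ref_fst_nonneg a k0 _
    rw [max_eq_right (by omega : (-1 : Int) ≤ (ref a k0 (a.length - 1)).1),
      max_eq_right h0]
    have hX := init_le_foldl_max
      (K'.map (fun k => (ref a k (a.length - 1)).1)) ((ref a k0 (a.length - 1)).1)
    rw [if_neg (by omega)]
    ring
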